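-- pv_equiv track=rewrite | github.com/2do1/Algorithm | Programmers/Level1/과일 장수/solution.py | solution
-- ===== SOURCE A (Python) =====
-- def solution(k, m, score):
--     answer = 0
--
--     score = sorted(score, reverse=True)
--     box_count = len(score) // m # 박스의 개수
--
--     for index in range(box_count):
--         box = score[index * m:(index + 1) * m]
--         answer += min(box) * m
--
--     return answer
-- ===== SOURCE B (Python) =====
-- def solution(k, m, score):
--     boxes = len(score) // m  # same ZeroDivisionError as A when m == 0
--     if boxes <= 0:
--         return 0
--     limit = boxes * m  # number of apples that go into full boxes
--     counts = {}
--     for v in score: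
--         counts[v] = counts.get(v, 0) + 1
--     answer = 0
--     pos = 0  # apples placed so far, best first
--     for v in sorted(counts, reverse=True):
--         end = pos + counts[v]
--         hi = min(end, limit)
--         if pos < hi:
--             # box minima sit at positions m-1, 2m-1, ... ; count those inside [pos, hi)
--             answer += v * (hi // m - pos // m)
--         pos = end
--     return answer * m
-- ===== Notes on version B (the rewrite author's own statement) =====
-- stated objective: alternative
-- what changed: B replaces A's materialised descending sort plus per-box slice-and-min loop with a frequency dictionary: it sorts only the distinct values, walks them as runs keeping a running position, and counts the box-minimum positions falling inside each run arithmetically (hi//m - pos//m), never building the sorted list or any box.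
import Mathlib
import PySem

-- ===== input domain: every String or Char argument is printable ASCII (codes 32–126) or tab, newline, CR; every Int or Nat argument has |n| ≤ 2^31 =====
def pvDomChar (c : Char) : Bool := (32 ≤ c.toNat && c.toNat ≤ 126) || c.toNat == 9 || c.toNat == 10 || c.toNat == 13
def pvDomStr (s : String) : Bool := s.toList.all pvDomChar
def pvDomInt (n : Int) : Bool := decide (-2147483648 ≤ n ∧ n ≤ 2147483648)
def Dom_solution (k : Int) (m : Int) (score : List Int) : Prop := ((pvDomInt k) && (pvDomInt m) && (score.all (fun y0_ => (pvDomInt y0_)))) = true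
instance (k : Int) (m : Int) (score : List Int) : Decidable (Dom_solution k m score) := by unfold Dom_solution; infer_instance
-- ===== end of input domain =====

-- B replaces A's materialised sort + per-box slice-and-min loop by a frequency
-- dictionary: it sorts only the distinct values, walks them as runs with a running
-- position and counts the box-minimum positions inside each run arithmetically;
-- objective: alternative (different algorithm/data structure, similar cost).

-- ===== PORT A =====
def solution (k : Int) (m : Int) (score : List Int) : Int :=
  let s := PySem.List.sorted score (fun x => x) true
  let boxCount := PySem.Int.floordiv ((s.length : Int)) m
  (PySem.List.pyRange 0 boxCount 1).foldl
    (fun answer index =>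
      let box := PySem.List.slice s (some (index * m)) (some ((index + 1) * m))
      answer + ((PySem.List.min? box (fun x => x)).getD 0) * m) 0
  -- min(box) raises only on an empty box, which never occurs under Pre_; getD 0 is unreachable there

-- ===== PORT B =====
def solution_alt (k : Int) (m : Int) (score : List Int) : Int :=
  let boxes := PySem.Int.floordiv ((score.length : Int)) m
  if boxes ≤ 0 then 0
  else
    let limit := boxes * m
    let counts := score.foldl (fun d v => d.insert v (d.getD v 0 + 1)) PySem.Dict.empty
    ((PySem.List.sorted counts.keys (fun x => x) true).foldl
      (fun (st : Int × Int) v =>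
        let endp := st.2 + counts.getD v 0
        let hi := min endp limit
        ((if st.2 < hi then
            st.1 + v * (PySem.Int.floordiv hi m - PySem.Int.floordiv st.2 m)
          else st.1), endp))
      (0, 0)).1 * m

-- ===== PRECONDITION & SPEC =====
-- Pre_ excludes exactly m = 0, where A (and B) raise ZeroDivisionError at len(score) // m.
def Pre_solution (k : Int) (m : Int) (score : List Int) : Prop := m ≠ 0
instance (k : Int) (m : Int) (score : List Int) : Decidable (Pre_solution k m score) := by unfold Pre_solution; infer_instance
def pvWitness_solution : Int × Int × List Int := (0, 2, [3, 1, 2, 4])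

def Spec_solution (k : Int) (m : Int) (score : List Int) (out : Int) : Prop := out = solution_alt k m score
instance (k : Int) (m : Int) (score : List Int) (out : Int) : Decidable (Spec_solution k m score out) := by unfold Spec_solution; infer_instance

-- ===== CLAIM (what is proved, stated in full; the proofs are below) =====
def Claim_equal_solution : Prop := ∀ (k : Int) (m : Int) (score : List Int), Dom_solution k m score → Pre_solution k m score → Spec_solution k m score (solution k m score)

-- ===== LEMMAS AND PROOFS =====

-- the last element of a descending list is ≤ every element
theorem getLast_le_of_desc (l : List Int) (hp : l.Pairwise (fun a b => b ≤ a)) (y : Int)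
    (hy : y ∈ l) (h : l ≠ []) : l.getLast h ≤ y := by
  induction l generalizing y with
  | nil => cases hy
  | cons x t ih =>
    rcases List.pairwise_cons.mp hp with ⟨hx, ht⟩
    cases t with
    | nil => simp at hy; simp [hy]
    | cons b t' =>
      rw [List.getLast_cons (by simp)]
      rcases List.mem_cons.mp hy with rfl | hyt
      · exact le_trans (ih ht _ (List.getLast_mem (by simp)) (by simp))
          (hx _ (List.getLast_mem (by simp)))
      · exact ih ht y hyt (by simp)

-- Python min of a nonempty descending list is its last element
theorem min?_desc_eq_getLast (l : List Int) (hp : l.Pairwise (fun a b => b ≤ a))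
    (h : l ≠ []) : PySem.List.min? l (fun x => x) = some (l.getLast h) := by
  cases hmin : PySem.List.min? l (fun x => x) with
  | none => exact absurd ((PySem.List.min?_eq_none_iff l _).mp hmin) h
  | some v =>
    congr 1
    exact le_antisymm (PySem.List.min?_isMin hmin _ (List.getLast_mem h))
      (getLast_le_of_desc l hp v (PySem.List.min?_mem hmin) h)

-- min over a full box of a descending list is the element closing the box
theorem min?_box (s : List Int) (hp : s.Pairwise (fun a b => b ≤ a)) (j M : Nat)
    (hM : 0 < M) (hle : j + M ≤ s.length) :
    PySem.List.min? ((s.drop j).take M) (fun x => x) = some (s[j + M - 1]'(by omega)) := by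
  have hlen : ((s.drop j).take M).length = M := by simp; omega
  have hne : (s.drop j).take M ≠ [] := by
    intro hnil; rw [hnil] at hlen; simp at hlen; omega
  have hpb : ((s.drop j).take M).Pairwise (fun a b => b ≤ a) :=
    hp.sublist (((s.drop j).take_sublist M).trans (s.drop_sublist j))
  rw [min?_desc_eq_getLast _ hpb hne]
  congr 1
  rw [List.getLast_eq_getElem]
  have h1 : ((s.drop j).take M).length - 1 < M := by omega
  rw [List.getElem_take, List.getElem_drop]
  congr 1
  omega

-- A's loop, for m > 0, is m times the sum of the elements closing each full box
theorem A_eval (k m : Int) (score : List Int) (hpos : 0 < m) :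
    solution k m score =
      m * ((List.range ((PySem.List.sorted score (fun x => x) true).length / m.toNat)).map
        (fun j => (PySem.List.sorted score (fun x => x) true).getD
          (j * m.toNat + m.toNat - 1) 0)).sum := by
  simp only [solution]
  set s := PySem.List.sorted score (fun x => x) true with hs
  have hp : s.Pairwise (fun a b => b ≤ a) := PySem.List.sorted_pairwise_rev score _
  set M := m.toNat with hMdef
  have hmM : m = (M : Int) := (Int.toNat_of_nonneg (le_of_lt hpos)).symm
  have hM : 0 < M := by omega
  set n := s.length with hn
  set B := n / M with hBdef
  have hbc : PySem.Int.floordiv ((n : Int)) m = (B : Int) := by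
    rw [hmM]; exact_mod_cast PySem.Int.floordiv_natCast n M
  rw [hbc]
  have hA : PySem.List.pyRange 0 ((B : Int)) 1 =
      List.map (fun j : Nat => ((j : Int))) (List.range B) := by
    rw [PySem.List.pyRange_one]; simp
  rw [hA, List.foldl_map, PySem.List.foldl_add]
  have hidx : ∀ j, j ∈ List.range B → j * M + M ≤ n := by
    intro j hj
    have hjB : j + 1 ≤ B := List.mem_range.mp hj
    have h1 := (Nat.le_div_iff_mul_le hM).mp hjB
    have h2 : j * M + M = (j + 1) * M := by ring
    omega
  have hAmap : ∀ (j : Nat) (hj : j ∈ List.range B),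
      ((PySem.List.min? (PySem.List.slice s (some ((j : Int) * m)) (some (((j : Int) + 1) * m))) (fun x => x)).getD 0) * m
        = s.getD (j * M + M - 1) 0 * m := by
    intro j hj
    have hsl : PySem.List.slice s (some ((j : Int) * m)) (some (((j : Int) + 1) * m))
        = (s.drop (j * M)).take M := by
      have : ((j : Int) + 1) * m = ((j : Int) * m) + m := by ring
      rw [this, hmM]
      exact_mod_cast PySem.List.slice_natCast_add s (j * M) M
    rw [hsl, min?_box s hp (j * M) M hM (hidx j hj),
      List.getD_eq_getElem s 0 (by have := hidx j hj; omega)]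
    rfl
  rw [List.map_congr_left hAmap, List.sum_map_mul_right]
  ring

-- counting in a concatenation of runs over distinct values
theorem count_flatMap_runs (K : List Int) (c : Int → Nat) (w : Int) (hnd : K.Nodup) :
    (K.flatMap (fun v => List.replicate (c v) v)).count w = if w ∈ K then c w else 0 := by
  induction K with
  | nil => simp
  | cons v K ih =>
    rcases List.nodup_cons.mp hnd with ⟨hv, hnd'⟩
    simp only [List.flatMap_cons, List.count_append, List.count_replicate, ih hnd',
      List.mem_cons]
    by_cases hw : w = v
    · subst hw; simp [hv]
    · simp [hw, Ne.symm hw]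

-- a strictly descending list of values expands to a weakly descending run list
theorem pairwise_flatMap_runs (K : List Int) (c : Int → Nat)
    (hp : K.Pairwise (fun a b => b < a)) :
    (K.flatMap (fun v => List.replicate (c v) v)).Pairwise (fun a b => b ≤ a) := by
  induction K with
  | nil => simp
  | cons v K ih =>
    rcases List.pairwise_cons.mp hp with ⟨hv, hp'⟩
    simp only [List.flatMap_cons]
    rw [List.pairwise_append]
    refine ⟨?_, ih hp', ?_⟩
    · exact List.pairwise_replicate.mpr (Or.inr le_rfl)
    · intro a ha b hb
      obtain rfl := List.eq_of_mem_replicate ha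
      obtain ⟨u, hu, hb'⟩ := List.mem_flatMap.mp hb
      obtain rfl := List.eq_of_mem_replicate hb'
      exact le_of_lt (hv _ hu)

-- the descending sort is the concatenation of the runs of its distinct values (descending)
theorem sorted_rev_eq_flatMap_runs (score : List Int) :
    PySem.List.sorted score (fun x => x) true =
      (PySem.List.sorted (PySem.Set.ofList score) (fun x => x) true).flatMap
        (fun v => List.replicate (score.count v) v) := by
  set K := PySem.List.sorted (PySem.Set.ofList score) (fun x => x) true with hK
  have hKperm : K.Perm (PySem.Set.ofList score) := PySem.List.sorted_perm _ _ _
  have hKnd : K.Nodup := (hKperm.nodup_iff).mpr (PySem.Set.nodup_ofList score)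
  have hKmem : ∀ v, v ∈ K ↔ v ∈ score :=
    fun v => (hKperm.mem_iff).trans (PySem.Set.mem_ofList _ v)
  have hKgt : K.Pairwise (fun a b => b < a) := by
    have h1 := PySem.List.sorted_pairwise_rev (PySem.Set.ofList score) (fun x : Int => x)
    have h2 : K.Pairwise (fun a b : Int => a ≠ b) := hKnd
    exact (h1.and h2).imp (fun h => lt_of_le_of_ne h.1 (Ne.symm h.2))
  have hperm : (K.flatMap fun v => List.replicate (score.count v) v).Perm score := by
    rw [List.perm_iff_count]
    intro w
    rw [count_flatMap_runs K _ w hKnd]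
    by_cases hw : w ∈ score
    · simp [(hKmem w).mpr hw]
    · rw [if_neg (fun h => hw ((hKmem w).mp h)), Eq.comm, List.count_eq_zero]
      exact hw
  have hys : (K.flatMap fun v => List.replicate (score.count v) v).Pairwise (fun a b => b ≤ a) :=
    pairwise_flatMap_runs K _ hKgt
  have hs := PySem.List.sorted_pairwise_rev score (fun x : Int => x)
  exact PySem.List.eq_of_perm_of_pairwise_le_of_injective (fun x : Int => -x) neg_injective
    ((PySem.List.sorted_perm score _ _).trans hperm.symm)
    (hs.imp (fun h => by simpa using h)) (hys.imp (fun h => by simpa using h))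

-- invariant of B's run loop
theorem fold_runs (s : List Int) (M B : Nat) (hM : 0 < M) (hT : B * M ≤ s.length)
    (c : Int → Nat) (K : List Int) (p : Nat) (a : Int)
    (hdrop : s.drop p = K.flatMap (fun v => List.replicate (c v) v)) :
    (K.foldl
      (fun (st : Int × Int) v =>
        ((if st.2 < min (st.2 + ((c v : Nat) : Int)) ((B : Int) * (M : Int)) then
            st.1 + v * (PySem.Int.floordiv (min (st.2 + ((c v : Nat) : Int)) ((B : Int) * (M : Int))) (M : Int)
                        - PySem.Int.floordiv st.2 (M : Int))
          else st.1), st.2 + ((c v : Nat) : Int)))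
      (a, (p : Int))).1
    = a + ((List.range' (min p (B * M) / M) (B - min p (B * M) / M)).map
        (fun j => s.getD (j * M + M - 1) 0)).sum := by
  induction K generalizing p a with
  | nil =>
    simp only [List.flatMap_nil] at hdrop
    have hple : s.length ≤ p := List.drop_eq_nil_iff.mp hdrop
    have hmin : min p (B * M) = B * M := Nat.min_eq_right (le_trans hT hple)
    simp [hmin, Nat.mul_div_cancel _ hM]
  | cons v K ih =>
    have hsplit : s.drop p
        = List.replicate (c v) v ++ K.flatMap (fun u => List.replicate (c u) u) := by
      simpa using hdrop
    have hdrop' : s.drop (p + c v) = K.flatMap (fun u => List.replicate (c u) u) := by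
      have h1 : s.drop (p + c v) = (s.drop p).drop (c v) := by
        rw [List.drop_drop]
      rw [h1, hsplit]
      simp
    rw [List.foldl_cons]
    have hcast : (p : Int) + ((c v : Nat) : Int) = (((p + c v : Nat)) : Int) := by push_cast; ring
    have hicast : min ((((p + c v : Nat)) : Int)) ((B : Int) * (M : Int))
        = ((min (p + c v) (B * M) : Nat) : Int) := by
      rw [Nat.cast_min]; push_cast; ring_nf
    simp only [hcast, hicast]
    rw [ih _ _ hdrop']
    -- abbreviations
    set T := B * M with hTdef
    set lo := min p T / M with hlo
    set lo' := min (p + c v) T / M with hlo'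
    have hll : lo ≤ lo' := Nat.div_le_div_right (min_le_min (Nat.le_add_right _ _) le_rfl)
    have hloB : lo' ≤ B := by
      have h1 : min (p + c v) T ≤ T := min_le_right _ _
      have h2 : T / M = B := by rw [hTdef, Nat.mul_div_cancel _ hM]
      calc lo' ≤ T / M := Nat.div_le_div_right h1
        _ = B := h2
    -- split the target sum at lo'
    have hsum : List.range' lo (B - lo) = List.range' lo (lo' - lo) ++ List.range' lo' (B - lo') := by
      have h := @List.range'_append_1 lo (lo' - lo) (B - lo')
      rw [show lo + (lo' - lo) = lo' from by omega,
        show lo' - lo + (B - lo') = B - lo from by omega] at h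
      exact h.symm
    rw [hsum, List.map_append, List.sum_append]
    -- it remains to account the step's contribution
    have hstep : (if (p : Int) < ((min (p + c v) T : Nat) : Int) then
          a + v * (PySem.Int.floordiv ((min (p + c v) T : Nat) : Int) ((M : Nat) : Int)
                   - PySem.Int.floordiv ((p : Nat) : Int) ((M : Nat) : Int))
        else a)
        = a + ((List.range' lo (lo' - lo)).map (fun j => s.getD (j * M + M - 1) 0)).sum := by
      by_cases hpT : T ≤ p
      · have h1 : min (p + c v) T = T := Nat.min_eq_right (le_trans hpT (Nat.le_add_right _ _))
        have h2 : lo = B := by rw [hlo, Nat.min_eq_right hpT, hTdef, Nat.mul_div_cancel _ hM]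
        have h3 : lo' = B := by rw [hlo', h1, hTdef, Nat.mul_div_cancel _ hM]
        rw [if_neg (by push_cast [h1]; omega)]
        simp [h2, h3]
      · rw [Nat.not_le] at hpT
        have hlop : lo = p / M := by rw [hlo, Nat.min_eq_left (le_of_lt hpT)]
        rcases Nat.eq_zero_or_pos (c v) with hc0 | hcpos
        · have h1 : min (p + c v) T = p := by rw [hc0]; simpa using Nat.min_eq_left (le_of_lt hpT)
          have h2 : lo' = lo := by rw [hlo', h1, hlop]
          rw [if_neg (by push_cast [h1]; omega)]
          simp [h2]
        · have hcond : p < min (p + c v) T := lt_min (by omega) hpT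
          rw [if_pos (by exact_mod_cast hcond)]
          rw [PySem.Int.floordiv_natCast, PySem.Int.floordiv_natCast]
          -- every picked index falls inside this run, whose elements are all v
          have hconst : ∀ j ∈ List.range' lo (lo' - lo),
              s.getD (j * M + M - 1) 0 = v := by
            intro j hj
            rw [List.mem_range'_1] at hj
            have hjlo : lo ≤ j := hj.1
            have hjlt : j < lo' := by omega
            have hge : p ≤ j * M + M - 1 := by
              have h1 := Nat.div_add_mod p M
              have h2 : p % M < M := Nat.mod_lt _ hM
              have h3 : p / M * M ≤ j * M := Nat.mul_le_mul_right _ (by omega)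
              have h4 : M * (p / M) = p / M * M := Nat.mul_comm _ _
              omega
            have hup : (j + 1) * M ≤ min (p + c v) T := by
              have h1 : (j + 1) * M ≤ lo' * M := Nat.mul_le_mul_right _ (by omega)
              have h2 : lo' * M ≤ min (p + c v) T := by rw [hlo']; exact Nat.div_mul_le_self _ _
              omega
            have hlt : j * M + M - 1 < p + c v := by
              have := min_le_left (p + c v) T
              have h2 : (j + 1) * M = j * M + M := by ring
              omega
            have hlen : j * M + M - 1 < s.length := by
              have h1 := min_le_right (p + c v) T
              have h2 : (j + 1) * M = j * M + M := by ring
              omega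
            rw [List.getD_eq_getElem s 0 hlen]
            have hidx : j * M + M - 1 = p + (j * M + M - 1 - p) := by omega
            have hdP : (s.drop p)[j * M + M - 1 - p]'(by simp; omega) = s[j * M + M - 1] := by
              rw [List.getElem_drop]
              congr 1
              omega
            rw [← hdP]
            have hsm : j * M + M - 1 - p < c v := by omega
            rw [List.getElem_of_eq hsplit]
            rw [List.getElem_append_left (by simpa using hsm)]
            exact List.getElem_replicate _
          rw [List.map_congr_left hconst, PySem.List.sum_map_const_int]
          have hlen' : (List.range' lo (lo' - lo)).length = lo' - lo := List.length_range'
          rw [hlen', Nat.cast_sub hll, ← hlo', ← hlop]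
          ring
    rw [hstep]
    ring

-- ===== VERDICT (by name: the statement is the Claim_ definition above) =====
theorem solution_spec : Claim_equal_solution := by
  intro k m score _ hm
  unfold Spec_solution
  have hslen : (PySem.List.sorted score (fun x => x) true).length = score.length :=
    (PySem.List.sorted_perm score _ _).length_eq
  rcases lt_or_gt_of_ne hm with hneg | hpos
  · -- m < 0 : A's loop is empty and B's box count is nonpositive
    have hbc : PySem.Int.floordiv ((score.length : Int)) m ≤ 0 := by
      simp [PySem.Int.floordiv]
      exact Int.fdiv_nonpos_of_nonneg_of_nonpos (by positivity) (le_of_lt hneg)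
    have hA : PySem.List.pyRange 0 (PySem.Int.floordiv ((score.length : Int)) m) 1 = [] :=
      PySem.List.pyRange_one_eq_nil hbc
    simp only [solution, solution_alt, hslen, hA, List.foldl_nil]
    rw [if_pos hbc]
  · -- m > 0
    set M := m.toNat with hMdef
    have hmM : m = (M : Int) := (Int.toNat_of_nonneg (le_of_lt hpos)).symm
    have hM : 0 < M := by omega
    set n := score.length with hn
    set B := n / M with hBdef
    have hbcB : PySem.Int.floordiv ((n : Int)) m = (B : Int) := by
      rw [hmM]; exact_mod_cast PySem.Int.floordiv_natCast n M
    rw [A_eval k m score hpos]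
    rw [hslen]
    rcases Nat.eq_zero_or_pos B with hB0 | hBpos
    · -- no full box: both sides are 0
      simp only [solution_alt]
      rw [← hn, hbcB, if_pos (by rw [hB0]; simp), show n / m.toNat = 0 from hB0]
      simp
    · simp only [solution_alt]
      rw [← hn, hbcB]
      rw [if_neg (not_le.mpr (by exact_mod_cast hBpos))]
      rw [PySem.Dict.foldl_insert_getD_add_one_eq_counter, PySem.Dict.keys_counter]
      have hcongr : (fun (st : Int × Int) (v : Int) =>
            ((if st.2 < min (st.2 + (PySem.Dict.counter score).getD v 0) ((B : Int) * m) then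
                st.1 + v * (PySem.Int.floordiv (min (st.2 + (PySem.Dict.counter score).getD v 0) ((B : Int) * m)) m
                            - PySem.Int.floordiv st.2 m)
              else st.1), st.2 + (PySem.Dict.counter score).getD v 0))
          = (fun (st : Int × Int) (v : Int) =>
            ((if st.2 < min (st.2 + ((score.count v : Nat) : Int)) ((B : Int) * (M : Int)) then
                st.1 + v * (PySem.Int.floordiv (min (st.2 + ((score.count v : Nat) : Int)) ((B : Int) * (M : Int))) ((M : Nat) : Int)
                            - PySem.Int.floordiv st.2 ((M : Nat) : Int))
              else st.1), st.2 + ((score.count v : Nat) : Int))) := by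
        funext st v
        simp only [PySem.Dict.getD_counter, hmM]
      have hT : B * M ≤ (PySem.List.sorted score (fun x => x) true).length := by
        rw [hslen]; exact Nat.div_mul_le_self n M
      have hdrop0 : (PySem.List.sorted score (fun x => x) true).drop 0
          = (PySem.List.sorted (PySem.Set.ofList score) (fun x => x) true).flatMap
              (fun v => List.replicate (score.count v) v) := by
        rw [List.drop_zero]; exact sorted_rev_eq_flatMap_runs score
      have hfr := fold_runs (PySem.List.sorted score (fun x => x) true) M B hM hT
        (fun v => score.count v) (PySem.List.sorted (PySem.Set.ofList score) (fun x => x) true)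
        0 0 hdrop0
      simp only [Nat.cast_zero] at hfr
      rw [hcongr, hfr]
      rw [Nat.min_eq_left (Nat.zero_le _), Nat.zero_div, Nat.sub_zero, ← List.range_eq_range']
      rw [← hMdef]
      ring
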